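-- pv_equiv track=rewrite | github.com/SeongHunTed/Algorithm | Algorithm/Programmers/Level2/42893.py | makeNumbers
-- ===== SOURCE A (Python) =====
-- import itertools
--
-- def makeNumbers(numbers):
--     nPr = []
--
--     for i in range(1, len(numbers)+1):
--         nPr += list(itertools.permutations(numbers, i))
--
--     results = set()
--     for permutation in nPr:
--         number = int(''.join([str(char) for char in permutation]))
--         results.add(number)
--
--     return results
-- ===== SOURCE B (Python) =====
-- def makeNumbers(numbers):
--     # Single BFS over shared prefixes: each level extends the previous level's
--     # partial permutations by one not-yet-used element (keyed by position),
--     # emitting int(prefix) at every node, instead of calling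
--     # itertools.permutations once per length and converting each tuple from scratch.
--     results = set()
--     frontier = [("", list(numbers))]
--     for _ in range(len(numbers)):
--         nxt = []
--         for prefix, remaining in frontier:
--             for i, x in enumerate(remaining):
--                 p = prefix + str(x)
--                 results.add(int(p))
--                 nxt.append((p, remaining[:i] + remaining[i + 1:]))
--         frontier = nxt
--     return results
-- ===== Notes on version B (the rewrite author's own statement) =====
-- stated objective: alternative
-- what changed: Replaces the per-length itertools.permutations calls plus a separate tuple-to-int collection loop with a single breadth-first search over shared string prefixes that extends partial permutations one position at a time and emits int(prefix) at every node.
import Mathlib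
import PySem

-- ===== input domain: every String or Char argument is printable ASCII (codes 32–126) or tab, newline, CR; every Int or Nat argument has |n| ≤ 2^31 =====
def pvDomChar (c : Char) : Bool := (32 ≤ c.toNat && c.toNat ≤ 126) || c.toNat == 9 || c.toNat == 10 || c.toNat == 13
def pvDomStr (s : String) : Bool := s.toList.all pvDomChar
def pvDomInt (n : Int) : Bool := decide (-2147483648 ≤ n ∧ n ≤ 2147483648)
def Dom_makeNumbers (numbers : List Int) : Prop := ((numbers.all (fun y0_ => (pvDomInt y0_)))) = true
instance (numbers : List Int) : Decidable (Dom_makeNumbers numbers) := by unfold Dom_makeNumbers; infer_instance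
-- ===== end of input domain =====

-- B replaces A's per-length itertools.permutations calls + separate collection loop by a
-- single breadth-first search over shared prefixes (same cost; objective: alternative).


-- ===== PORT A =====
-- int(''.join(...)) raises ValueError when a '-' lands inside the joined string;
-- PySem.Int.ofChars? is none exactly there and those inputs are outside Pre_ (the getD 0 is unreached).
def makeNumbers (numbers : List Int) : List Int :=
  let nPr : List (List Int) :=
    (PySem.List.pyRange 1 ((numbers.length : Int) + 1) 1).foldl
      (fun acc i => acc ++ PySem.List.permutations numbers i.toNat) []
  nPr.foldl
    (fun (results : PySem.Set Int) permutation =>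
      results.add ((PySem.Int.ofChars?
        ((permutation.map (fun c => PySem.Int.toChars c)).flatten)).getD 0))
    PySem.Set.empty

-- ===== PORT B =====
-- state = (results set, frontier of (prefix chars, remaining elements)); one outer pass per level.
def makeNumbers_alt (numbers : List Int) : List Int :=
  ((List.range numbers.length).foldl
    (fun (st : PySem.Set Int × List (List Char × List Int)) _ =>
      st.2.foldl
        (fun (st2 : PySem.Set Int × List (List Char × List Int)) pr =>
          (PySem.List.enumerate pr.2).foldl
            (fun (st3 : PySem.Set Int × List (List Char × List Int)) ix =>
              (st3.1.add ((PySem.Int.ofChars? (pr.1 ++ PySem.Int.toChars ix.2)).getD 0),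
               st3.2 ++ [(pr.1 ++ PySem.Int.toChars ix.2,
                 PySem.List.slice pr.2 none (some ix.1) ++
                 PySem.List.slice pr.2 (some (ix.1 + 1)) none)]))
            st2)
        (st.1, ([] : List (List Char × List Int))))
    (PySem.Set.empty, [(([] : List Char), numbers)])).1

-- ===== PRECONDITION & SPEC =====
-- Pre_ excludes exactly the inputs on which Python A raises ValueError: a negative element in a
-- list of length ≥ 2 puts a '-' inside some joined permutation string and int() fails there.
def Pre_makeNumbers (numbers : List Int) : Prop :=
  (∀ x ∈ numbers, 0 ≤ x) ∨ numbers.length ≤ 1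
instance (numbers : List Int) : Decidable (Pre_makeNumbers numbers) := by
  unfold Pre_makeNumbers; infer_instance
def pvWitness_makeNumbers : List Int := [1, 2, 10]

def Spec_makeNumbers (numbers : List Int) (out : List Int) : Prop := out = makeNumbers_alt numbers
instance (numbers : List Int) (out : List Int) : Decidable (Spec_makeNumbers numbers out) := by
  unfold Spec_makeNumbers; infer_instance

-- ===== CLAIM (what is proved, stated in full; the proofs are below) =====
def Claim_equal_makeNumbers : Prop := ∀ (numbers : List Int), Dom_makeNumbers numbers → Pre_makeNumbers numbers → Spec_makeNumbers numbers (makeNumbers numbers)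

-- ===== LEMMAS AND PROOFS =====

-- abbreviations for the values both programs add
def pvChars (p : List Int) : List Char := (p.map (fun c => PySem.Int.toChars c)).flatten
def pvNum (cs : List Char) : Int := (PySem.Int.ofChars? cs).getD 0
-- B's removal of position i (the two slices); equals eraseIdx on the indices enumerate yields
def pvRm (xs : List Int) (i : Int) : List Int :=
  PySem.List.slice xs none (some i) ++ PySem.List.slice xs (some (i + 1)) none
def pvExt (pr : List Char × List Int) : List (List Char × List Int) :=
  (PySem.List.enumerate pr.2).map (fun ix => (pr.1 ++ PySem.Int.toChars ix.2, pvRm pr.2 ix.1))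
-- the frontier after r BFS levels, started at (pre, xs)
def pvLevs (pre : List Char) (xs : List Int) : Nat → List (List Char × List Int)
  | 0 => [(pre, xs)]
  | r + 1 => (PySem.List.enumerate xs).flatMap
      (fun ix => pvLevs (pre ++ PySem.Int.toChars ix.2) (pvRm xs ix.1) r)
def pvAddAll (s : PySem.Set Int) (l : List Int) : PySem.Set Int := l.foldl PySem.Set.add s

theorem pvRm_natCast (xs : List Int) (k : Nat) : pvRm xs (k : Int) = xs.eraseIdx k := by
  unfold pvRm
  have h1 : (k : Int) + 1 = ((k + 1 : Nat) : Int) := by push_cast; ring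
  rw [PySem.List.slice_to_natCast, h1, PySem.List.slice_from_natCast,
    List.eraseIdx_eq_take_drop_succ]

theorem pvEnumFlat {β : Type} (xs : List Int) (F : Int → Int → List β) :
    (PySem.List.enumerate xs).flatMap (fun ix => F ix.1 ix.2)
    = (List.range xs.length).flatMap
        (fun (i : Nat) => match xs[i]? with | none => [] | some x => F (i : Int) x) := by
  rw [PySem.List.enumerate_eq_map_pyRange xs 0, List.flatMap_map, PySem.List.pyRange_one]
  have hlen : (PySem.List.len xs - 0).toNat = xs.length := by simp [PySem.List.len]
  rw [hlen, List.flatMap_map]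
  refine List.flatMap_congr (fun k hk => ?_)
  have hk' : k < xs.length := List.mem_range.mp hk
  have h0 : (0 : Int) + (k : Int) = (k : Int) := by ring
  rw [h0, PySem.List.pyGetD_natCast, List.getElem?_eq_getElem hk', List.getD_eq_getElem _ _ hk']

theorem pvAddAll_map {γ : Type} (l : List γ) (f : γ → Int) (s : PySem.Set Int) :
    l.foldl (fun t x => t.add (f x)) s = pvAddAll s (l.map f) := by
  simp [pvAddAll, List.foldl_map]

theorem pvAddAll_append (s : PySem.Set Int) (l1 l2 : List Int) :
    pvAddAll s (l1 ++ l2) = pvAddAll (pvAddAll s l1) l2 := by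
  simp [pvAddAll]

theorem pvChars_cons (x : Int) (p : List Int) :
    pvChars (x :: p) = PySem.Int.toChars x ++ pvChars p := by
  simp [pvChars]

theorem pvPerm_succ (xs : List Int) (r : Nat) : PySem.List.permutations xs (r + 1)
    = (List.range xs.length).flatMap (fun i => match xs[i]? with
      | none => [] | some x => (PySem.List.permutations (xs.eraseIdx i) r).map (fun p => x :: p)) := by
  rw [PySem.List.permutations]
  refine List.flatMap_congr (fun i _ => ?_)
  cases h : xs[i]? with
  | none => simp
  | some x => simp

theorem pvLevs_fst (r : Nat) : ∀ (pre : List Char) (xs : List Int),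
    (pvLevs pre xs r).map Prod.fst
    = (PySem.List.permutations xs r).map (fun p => pre ++ pvChars p) := by
  induction r with
  | zero =>
    intro pre xs
    simp [pvLevs, PySem.List.permutations, pvChars]
  | succ r ih =>
    intro pre xs
    show ((PySem.List.enumerate xs).flatMap _).map Prod.fst = _
    rw [List.map_flatMap]
    have hL : (PySem.List.enumerate xs).flatMap
        (fun ix => (pvLevs (pre ++ PySem.Int.toChars ix.2) (pvRm xs ix.1) r).map Prod.fst)
        = (PySem.List.enumerate xs).flatMap
        (fun ix => (PySem.List.permutations (pvRm xs ix.1) r).map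
          (fun p => (pre ++ PySem.Int.toChars ix.2) ++ pvChars p)) :=
      List.flatMap_congr (fun ix _ => ih _ _)
    rw [hL, pvEnumFlat xs (fun i x => (PySem.List.permutations (pvRm xs i) r).map
      (fun p => (pre ++ PySem.Int.toChars x) ++ pvChars p))]
    rw [pvPerm_succ, List.map_flatMap]
    refine List.flatMap_congr (fun i hi => ?_)
    cases h : xs[i]? with
    | none => simp
    | some x =>
      simp only [pvRm_natCast, List.map_map]
      refine List.map_congr_left (fun p _ => ?_)
      simp [Function.comp, pvChars_cons, List.append_assoc]

theorem pvStep (r : Nat) : ∀ (pre : List Char) (xs : List Int),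
    (pvLevs pre xs r).flatMap pvExt = pvLevs pre xs (r + 1) := by
  induction r with
  | zero =>
    intro pre xs
    rw [show pvLevs pre xs 0 = [(pre, xs)] from rfl, List.flatMap_singleton]
    show pvExt (pre, xs) = (PySem.List.enumerate xs).flatMap _
    rw [pvExt]
    rw [show (fun ix => pvLevs (pre ++ PySem.Int.toChars ix.2) (pvRm xs ix.1) 0)
        = (fun (ix : Int × Int) => [(pre ++ PySem.Int.toChars ix.2, pvRm xs ix.1)]) from rfl]
    exact List.map_eq_flatMap
  | succ r ih =>
    intro pre xs
    show ((PySem.List.enumerate xs).flatMap _).flatMap pvExt = _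
    rw [List.flatMap_assoc]
    show _ = (PySem.List.enumerate xs).flatMap _
    exact List.flatMap_congr (fun ix _ => ih _ _)

theorem pvInner (pre : List Char) (rem : List Int) (l : List (Int × Int))
    (s : PySem.Set Int) (acc : List (List Char × List Int)) :
    l.foldl
      (fun (st3 : PySem.Set Int × List (List Char × List Int)) ix =>
        (st3.1.add ((PySem.Int.ofChars? (pre ++ PySem.Int.toChars ix.2)).getD 0),
         st3.2 ++ [(pre ++ PySem.Int.toChars ix.2,
           PySem.List.slice rem none (some ix.1) ++
           PySem.List.slice rem (some (ix.1 + 1)) none)])) (s, acc)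
    = (pvAddAll s (l.map (fun ix => pvNum (pre ++ PySem.Int.toChars ix.2))),
       acc ++ l.map (fun ix => (pre ++ PySem.Int.toChars ix.2, pvRm rem ix.1))) := by
  induction l generalizing s acc with
  | nil => simp [pvAddAll]
  | cons a t ih => simp [ih, pvAddAll, pvNum, pvRm]

theorem pvMid (fr : List (List Char × List Int)) (s : PySem.Set Int)
    (acc : List (List Char × List Int)) :
    fr.foldl
      (fun (st2 : PySem.Set Int × List (List Char × List Int)) pr =>
        (PySem.List.enumerate pr.2).foldl
          (fun (st3 : PySem.Set Int × List (List Char × List Int)) ix =>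
            (st3.1.add ((PySem.Int.ofChars? (pr.1 ++ PySem.Int.toChars ix.2)).getD 0),
             st3.2 ++ [(pr.1 ++ PySem.Int.toChars ix.2,
               PySem.List.slice pr.2 none (some ix.1) ++
               PySem.List.slice pr.2 (some (ix.1 + 1)) none)]))
          st2) (s, acc)
    = (pvAddAll s (fr.flatMap (fun pr => (pvExt pr).map (fun q => pvNum q.1))),
       acc ++ fr.flatMap pvExt) := by
  induction fr generalizing s acc with
  | nil => simp [pvAddAll]
  | cons a t ih =>
    rw [List.foldl_cons, pvInner a.1 a.2, ih]
    simp [pvExt, pvAddAll_append, List.map_map, Function.comp_def]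

theorem pvOuter (numbers : List Int) (n : Nat) :
    (List.range n).foldl
      (fun (st : PySem.Set Int × List (List Char × List Int)) _ =>
        st.2.foldl
          (fun (st2 : PySem.Set Int × List (List Char × List Int)) pr =>
            (PySem.List.enumerate pr.2).foldl
              (fun (st3 : PySem.Set Int × List (List Char × List Int)) ix =>
                (st3.1.add ((PySem.Int.ofChars? (pr.1 ++ PySem.Int.toChars ix.2)).getD 0),
                 st3.2 ++ [(pr.1 ++ PySem.Int.toChars ix.2,
                   PySem.List.slice pr.2 none (some ix.1) ++
                   PySem.List.slice pr.2 (some (ix.1 + 1)) none)]))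
              st2)
          (st.1, ([] : List (List Char × List Int))))
      (PySem.Set.empty, [(([] : List Char), numbers)])
    = (pvAddAll PySem.Set.empty
        ((List.range n).flatMap (fun k => (pvLevs [] numbers (k + 1)).map (fun q => pvNum q.1))),
       pvLevs [] numbers n) := by
  induction n with
  | zero => simp [pvLevs, pvAddAll]
  | succ n ih =>
    rw [List.range_succ, List.foldl_append, ih, List.foldl_cons, List.foldl_nil]
    dsimp only
    rw [pvMid, List.flatMap_append, List.flatMap_singleton, List.nil_append]
    have hstep : List.flatMap pvExt (pvLevs [] numbers n) = pvLevs [] numbers (n + 1) :=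
      pvStep n [] numbers
    have hadds : List.flatMap (fun pr => (pvExt pr).map (fun q => pvNum q.1))
        (pvLevs [] numbers n) = (pvLevs [] numbers (n + 1)).map (fun q => pvNum q.1) := by
      rw [← hstep, List.map_flatMap]
    rw [hstep, hadds, pvAddAll_append]

theorem pv_alt_eq (numbers : List Int) :
    makeNumbers_alt numbers
    = pvAddAll PySem.Set.empty
        ((List.range numbers.length).flatMap
          (fun k => (pvLevs [] numbers (k + 1)).map (fun q => pvNum q.1))) := by
  unfold makeNumbers_alt
  rw [pvOuter]

theorem pv_a_eq (numbers : List Int) :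
    makeNumbers numbers
    = pvAddAll PySem.Set.empty
        (((PySem.List.pyRange 1 ((numbers.length : Int) + 1) 1).flatMap
            (fun i => PySem.List.permutations numbers i.toNat)).map
          (fun p => pvNum (pvChars p))) := by
  show ((PySem.List.pyRange 1 ((numbers.length : Int) + 1) 1).foldl
      (fun acc i => acc ++ PySem.List.permutations numbers i.toNat) []).foldl _ _ = _
  rw [PySem.List.foldl_append_eq_flatMap, List.nil_append]
  rw [show (fun (results : PySem.Set Int) permutation =>
      results.add ((PySem.Int.ofChars?
        ((permutation.map (fun c => PySem.Int.toChars c)).flatten)).getD 0))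
    = fun (results : PySem.Set Int) permutation => results.add (pvNum (pvChars permutation))
    from by funext s p; simp [pvNum, pvChars]]
  rw [pvAddAll_map]

theorem pv_adds_eq (numbers : List Int) :
    ((PySem.List.pyRange 1 ((numbers.length : Int) + 1) 1).flatMap
        (fun i => PySem.List.permutations numbers i.toNat)).map (fun p => pvNum (pvChars p))
    = (List.range numbers.length).flatMap
        (fun k => (pvLevs [] numbers (k + 1)).map (fun q => pvNum q.1)) := by
  rw [List.map_flatMap, PySem.List.pyRange_one, List.flatMap_map]
  have h1 : ((numbers.length : Int) + 1 - 1).toNat = numbers.length := by omega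
  rw [h1]
  refine List.flatMap_congr (fun k _ => ?_)
  have h2 : (1 + (k : Int)).toNat = k + 1 := by omega
  have h3 : (pvLevs [] numbers (k + 1)).map (fun q => pvNum q.1)
      = ((pvLevs [] numbers (k + 1)).map Prod.fst).map pvNum := by
    rw [List.map_map]; rfl
  rw [h2, h3, pvLevs_fst]
  simp [List.map_map, Function.comp_def]

-- ===== VERDICT (by name: the statement is the Claim_ definition above) =====
theorem makeNumbers_spec : Claim_equal_makeNumbers := by
  intro numbers _ _
  unfold Spec_makeNumbers
  rw [pv_a_eq, pv_alt_eq, pv_adds_eq]
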